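-- pv_equiv track=rewrite | github.com/Artem-aleks/Aleksanov-Artem-str_v2 | ft_find_second_char.py | ft_find_second_char
-- ===== SOURCE A (Python) =====
-- def ft_len(str):
--     s = 0
--     for i in str:
--         s += 1
--     return (s)
--
-- def ft_find_second_char(char, str):
--     count = 0
--     x = 0
--     r = 0
--     if char in str:
--         for i in range(ft_len(str)):
--             if str[i] == char:
--                 x = i
--
--                 break
--
--         for i in str:
--             if i == char:
--                 count += 1
--         if count == 1:
--             return -1
--         else:
--             for i in range(ft_len(str)):
--                 if str[i] == char and i != x:
--                     r = i
--
--                     break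
--
--             return r
--     else:
--         return -2
-- ===== SOURCE B (Python) =====
-- def ft_find_second_char(char, str):
--     if char not in str:
--         return -2
--     count = 0
--     second = 0
--     for i, c in enumerate(str):
--         if c == char:
--             count += 1
--             if count == 2:
--                 second = i
--     if count == 1:
--         return -1
--     return second
-- ===== Notes on version B (the rewrite author's own statement) =====
-- stated objective: simpler
-- what changed: A's four scans (ft_len, find-first-index, count loop, find-second-index loop) are replaced by one enumerate pass that keeps a count and records the index where the count reaches two.
import Mathlib
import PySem

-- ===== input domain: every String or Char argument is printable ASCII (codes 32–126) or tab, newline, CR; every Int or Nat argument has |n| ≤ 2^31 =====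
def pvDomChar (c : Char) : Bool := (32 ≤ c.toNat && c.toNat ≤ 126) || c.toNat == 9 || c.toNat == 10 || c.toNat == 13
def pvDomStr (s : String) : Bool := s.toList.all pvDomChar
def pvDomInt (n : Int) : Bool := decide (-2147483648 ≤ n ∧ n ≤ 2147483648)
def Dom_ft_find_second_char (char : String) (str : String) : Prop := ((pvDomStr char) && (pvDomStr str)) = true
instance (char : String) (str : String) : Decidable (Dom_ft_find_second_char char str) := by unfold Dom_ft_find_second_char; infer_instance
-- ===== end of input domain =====

-- B replaces A's four sequential scans (length, first-index, count, second-index) by one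
-- index-carrying pass that counts matches and records the index where the count reaches two.

-- ===== PORT A =====
-- 'for i in range(ft_len(str)): if str[i] == char: x = i; break' — ported as index-carrying
-- recursion over the characters (str[i] is exactly the i-th character as a 1-char string).
def ftFirstLoop (char : String) : List Char → Int → Int → Int
  | [], _, x => x
  | c :: rest, i, x => if String.ofList [c] = char then i else ftFirstLoop char rest (i + 1) x

-- 'for i in str: if i == char: count += 1'
def ftCountLoop (char : String) : List Char → Int → Int
  | [], count => count
  | c :: rest, count => ftCountLoop char rest (if String.ofList [c] = char then count + 1 else count)

-- 'for i in range(ft_len(str)): if str[i] == char and i != x: r = i; break'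
def ftSecondLoop (char : String) (x : Int) : List Char → Int → Int → Int
  | [], _, r => r
  | c :: rest, i, r =>
    if String.ofList [c] = char ∧ i ≠ x then i else ftSecondLoop char x rest (i + 1) r

def ft_find_second_char (char : String) (str : String) : Int :=
  if PySem.Str.isIn char str then
    let x := ftFirstLoop char str.toList 0 0
    let count := ftCountLoop char str.toList 0
    if count = 1 then -1
    else ftSecondLoop char x str.toList 0 0
  else -2

-- ===== PORT B =====
-- 'for i, c in enumerate(str): …' — one pass carrying (index, count, second).
def altLoop (char : String) : List Char → Int → Int → Int → Int × Int
  | [], _, count, second => (count, second)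
  | c :: rest, i, count, second =>
    if String.ofList [c] = char then
      altLoop char rest (i + 1) (count + 1) (if count + 1 = 2 then i else second)
    else altLoop char rest (i + 1) count second

def ft_find_second_char_alt (char : String) (str : String) : Int :=
  if !(PySem.Str.isIn char str) then -2
  else
    let p := altLoop char str.toList 0 0 0
    if p.1 = 1 then -1 else p.2

-- ===== PRECONDITION & SPEC =====
def Spec_ft_find_second_char (char : String) (str : String) (out : Int) : Prop := out = ft_find_second_char_alt char str
instance (char : String) (str : String) (out : Int) : Decidable (Spec_ft_find_second_char char str out) := by unfold Spec_ft_find_second_char; infer_instance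

-- ===== CLAIM (what is proved, stated in full; the proofs are below) =====
def Claim_equal_ft_find_second_char : Prop := ∀ (char : String) (str : String), Dom_ft_find_second_char char str → Spec_ft_find_second_char char str (ft_find_second_char char str)

-- ===== LEMMAS AND PROOFS =====

theorem ftCountLoop_acc (char : String) (l : List Char) :
    ∀ a : Int, ftCountLoop char l a = a + ftCountLoop char l 0 := by
  induction l with
  | nil => intro a; simp [ftCountLoop]
  | cons c rest ih =>
    intro a
    by_cases h : String.ofList [c] = char
    · simp only [ftCountLoop, if_pos h, zero_add]
      rw [ih (a + 1), ih 1]; ring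
    · simp only [ftCountLoop, if_neg h]
      exact ih a

theorem ftCountLoop_nonneg (char : String) (l : List Char) : 0 ≤ ftCountLoop char l 0 := by
  induction l with
  | nil => simp [ftCountLoop]
  | cons c rest ih =>
    by_cases h : String.ofList [c] = char
    · simp only [ftCountLoop, if_pos h, zero_add, ftCountLoop_acc char rest 1]; omega
    · simpa [ftCountLoop, h] using ih

theorem altLoop_ge2 (char : String) (l : List Char) :
    ∀ (i count second : Int), 2 ≤ count →
      altLoop char l i count second = (count + ftCountLoop char l 0, second) := by
  induction l with
  | nil => intro i count second _; simp [altLoop, ftCountLoop]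
  | cons c rest ih =>
    intro i count second hc
    by_cases h : String.ofList [c] = char
    · have : ¬ (count + 1 = 2) := by omega
      simp [altLoop, h, this, ih (i + 1) (count + 1) second (by omega),
        ftCountLoop, ftCountLoop_acc char rest 1]
      ring
    · simp [altLoop, h, ih (i + 1) count second hc, ftCountLoop]

theorem ftSecondLoop_gt (char : String) (l : List Char) :
    ∀ (i x r : Int), x < i → ftSecondLoop char x l i r = ftFirstLoop char l i r := by
  induction l with
  | nil => intro i x r _; simp [ftSecondLoop, ftFirstLoop]
  | cons c rest ih =>
    intro i x r hx
    by_cases h : String.ofList [c] = char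
    · have : i ≠ x := by omega
      simp [ftSecondLoop, ftFirstLoop, h, this]
    · simp [ftSecondLoop, ftFirstLoop, h, ih (i + 1) x r (by omega)]

theorem phase2 (char : String) (l : List Char) :
    ∀ i : Int,
      (if (altLoop char l i 1 0).1 = 1 then (-1 : Int) else (altLoop char l i 1 0).2)
        = if ftCountLoop char l 0 = 0 then -1 else ftFirstLoop char l i 0 := by
  induction l with
  | nil => intro i; simp [altLoop, ftCountLoop]
  | cons c rest ih =>
    intro i
    by_cases h : String.ofList [c] = char
    · have hge : 0 ≤ ftCountLoop char rest 0 := ftCountLoop_nonneg char rest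
      have halt := altLoop_ge2 char rest (i + 1) 2 i (by omega)
      have h1 : ¬ (2 + ftCountLoop char rest 0 = 1) := by omega
      have h2 : ¬ (ftCountLoop char rest 1 = 0) := by
        rw [ftCountLoop_acc char rest 1]; omega
      simp [altLoop, h, halt, h1, ftCountLoop, ftFirstLoop, h2]
    · simp [altLoop, h, ftCountLoop, ftFirstLoop, ih (i + 1)]

theorem mainLoop (char : String) (l : List Char) :
    ∀ i : Int,
      (if ftCountLoop char l 0 = 1 then (-1 : Int)
        else ftSecondLoop char (ftFirstLoop char l i 0) l i 0)
        = if (altLoop char l i 0 0).1 = 1 then -1 else (altLoop char l i 0 0).2 := by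
  induction l with
  | nil => intro i; simp [ftCountLoop, ftSecondLoop, altLoop]
  | cons c rest ih =>
    intro i
    by_cases h : String.ofList [c] = char
    · have hsec := ftSecondLoop_gt char rest (i + 1) i 0 (by omega)
      have hcnt : ftCountLoop char rest 1 = 1 + ftCountLoop char rest 0 :=
        ftCountLoop_acc char rest 1
      have hni : ¬ (String.ofList [c] = char ∧ i ≠ i) := by simp
      simp only [ftCountLoop, ftFirstLoop, ftSecondLoop, altLoop, if_pos h, if_neg hni,
        zero_add, hsec, hcnt]
      rw [if_neg (by norm_num : ¬ ((1 : Int) = 2))]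
      rw [if_congr (by omega : (1 + ftCountLoop char rest 0 = 1) ↔ (ftCountLoop char rest 0 = 0)) rfl rfl]
      exact (phase2 char rest (i + 1)).symm
    · simp only [ftCountLoop, ftFirstLoop, ftSecondLoop, altLoop, if_neg h,
        if_neg (by simp [h] : ¬ (String.ofList [c] = char ∧ i ≠ ftFirstLoop char rest (i + 1) 0))]
      exact ih (i + 1)

-- ===== VERDICT (by name: the statement is the Claim_ definition above) =====
theorem ft_find_second_char_spec : Claim_equal_ft_find_second_char := by
  intro char str _
  unfold Spec_ft_find_second_char ft_find_second_char ft_find_second_char_alt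
  cases hin : PySem.Str.isIn char str
  · simp
  · simpa using mainLoop char str.toList 0
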